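-- pv_equiv track=rewrite | github.com/peioardaiz-gale/Codes-for-the-generalized-Whitehead-poset | whitehead_poset.py | do_cross
-- ===== SOURCE A (Python) =====
-- from collections import defaultdict
--
-- def star(v, edges, vertices):
--     """Return st(v) = {v} union lk(v)."""
--     lk = {b for a, b in edges if a == v}
--     lk |= {a for a, b in edges if b == v}
--     return frozenset(lk | {v})
--
-- def get_components(verts, edges):
--     """Connected components of the subgraph induced by verts."""
--     remaining = set(verts)
--     adj = defaultdict(set)
--     for a, b in edges:
--         if a in remaining and b in remaining:
--             adj[a].add(b)
--             adj[b].add(a)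
--     visited = set()
--     components = []
--     for v in sorted(remaining):
--         if v in visited:
--             continue
--         comp = set()
--         stack = [v]
--         while stack:
--             node = stack.pop()
--             if node in visited:
--                 continue
--             visited.add(node)
--             comp.add(node)
--             stack.extend(adj[node] - visited)
--         components.append(frozenset(comp))
--     return components
--
-- def is_adjacent(u, v, edges):
--     return (u, v) in edges or (v, u) in edges
--
-- def shared_components(u, v, vertices, edges):
--     st_u = star(u, edges, vertices)
--     st_v = star(v, edges, vertices)
--     comps_u = set(get_components(frozenset(vertices) - st_u, edges))
--     comps_v = set(get_components(frozenset(vertices) - st_v, edges))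
--     return comps_u & comps_v
--
-- def dominant_component(u, v, vertices, edges):
--     st_u = star(u, edges, vertices)
--     remaining = frozenset(vertices) - st_u
--     for c in get_components(remaining, edges):
--         if v in c:
--             return c
--     return None
--
-- def do_cross(u, tau_u, v, tau_v, vertices, edges):
--     if is_adjacent(u, v, edges) or u == v:
--         return False
--     shared = shared_components(u, v, vertices, edges)
--     if not shared:
--         return False
--     D_v = dominant_component(u, v, vertices, edges)
--     D_u = dominant_component(v, u, vertices, edges)
--     for P in tau_u:
--         for Q in tau_v:
--             if D_v is not None and D_v.issubset(P):
--                 continue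
--             if D_u is not None and D_u.issubset(Q):
--                 continue
--             for C in shared:
--                 if C.issubset(P) and C.issubset(Q):
--                     return True
--     return False
-- ===== SOURCE B (Python) =====
-- def merge_components(verts, edges):
--     """Connected components of the subgraph induced by verts, computed by
--     merging blocks along edges (no graph traversal): start from singleton
--     blocks and, for each edge inside verts, fuse the two blocks holding its
--     endpoints."""
--     blocks = [{w} for w in verts]
--     for a, b in edges:
--         ba = next((B for B in blocks if a in B), None)
--         bb = next((B for B in blocks if b in B), None)
--         if ba is None or bb is None or ba is bb:
--             continue
--         blocks.remove(bb)
--         ba |= bb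
--     return blocks
--
--
-- def do_cross(u, tau_u, v, tau_v, vertices, edges):
--     if u == v or (u, v) in edges or (v, u) in edges:
--         return False
--     st_u = {u} | {b for a, b in edges if a == u} | {a for a, b in edges if b == u}
--     st_v = {v} | {b for a, b in edges if a == v} | {a for a, b in edges if b == v}
--     comps_u = merge_components(set(vertices) - st_u, edges)
--     comps_v = merge_components(set(vertices) - st_v, edges)
--     shared = [C for C in comps_u if any(C == D for D in comps_v)]
--     if not shared:
--         return False
--     D_v = next((C for C in comps_u if v in C), None)
--     D_u = next((C for C in comps_v if u in C), None)
--     # factorized: C witnesses a crossing iff some block of tau_u covers C but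
--     # not D_v and, independently, some block of tau_v covers C but not D_u
--     return any(
--         any(C <= set(P) and not (D_v is not None and D_v <= set(P)) for P in tau_u)
--         and any(C <= set(Q) and not (D_u is not None and D_u <= set(Q)) for Q in tau_v)
--         for C in shared
--     )
-- ===== Notes on version B (the rewrite author's own statement) =====
-- stated objective: alternative
-- what changed: B computes connected components by edge-driven block merging (start from singleton blocks and fuse the two blocks containing an edge's endpoints) instead of A's per-vertex DFS traversal, computes each component family once instead of four times, and replaces A's triple (P, Q, C) loop by a factorized per-component test: some tau_u block covers C but not D_v and, independently, some tau_v block covers C but not D_u.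
import Mathlib
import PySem

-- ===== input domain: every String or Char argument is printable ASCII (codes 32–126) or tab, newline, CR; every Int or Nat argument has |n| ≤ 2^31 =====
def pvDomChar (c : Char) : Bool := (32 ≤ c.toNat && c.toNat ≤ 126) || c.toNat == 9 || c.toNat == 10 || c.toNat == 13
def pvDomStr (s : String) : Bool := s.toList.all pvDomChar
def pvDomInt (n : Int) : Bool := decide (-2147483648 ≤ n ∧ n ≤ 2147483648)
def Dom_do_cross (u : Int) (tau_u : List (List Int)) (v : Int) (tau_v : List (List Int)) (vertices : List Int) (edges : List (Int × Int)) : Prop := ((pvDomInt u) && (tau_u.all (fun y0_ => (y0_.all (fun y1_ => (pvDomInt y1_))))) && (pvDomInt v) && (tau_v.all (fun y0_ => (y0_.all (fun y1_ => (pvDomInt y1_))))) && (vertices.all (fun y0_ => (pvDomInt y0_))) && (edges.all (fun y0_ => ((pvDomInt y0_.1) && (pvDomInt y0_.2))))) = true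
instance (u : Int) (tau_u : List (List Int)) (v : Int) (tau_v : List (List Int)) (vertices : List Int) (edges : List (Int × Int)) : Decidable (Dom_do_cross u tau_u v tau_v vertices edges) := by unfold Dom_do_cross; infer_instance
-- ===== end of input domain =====

-- B computes connected components by EDGE-DRIVEN BLOCK MERGING (start from singleton blocks, fuse the
-- two blocks holding an edge's endpoints) instead of A's per-vertex DFS, computes each component family
-- once instead of four times, and replaces A's triple (P, Q, C) loop by a per-component factorized test.

-- ===== PORT A =====
-- Shared module helpers of A (pyStar/get_components/is_adjacent), transliterated.
-- st(v) = {v} ∪ lk(v).  (The Python builds frozensets; downstream they are used only for membership,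
-- difference, subset and content equality, never iterated observably.)
def pyStar (v : Int) (edges : List (Int × Int)) (vertices : List Int) : PySem.Set Int :=
  let lk := PySem.Set.ofList ((edges.filter (fun p => p.1 == v)).map (fun p => p.2))
  let lk2 := PySem.Set.union lk ((edges.filter (fun p => p.2 == v)).map (fun p => p.1))
  PySem.Set.union lk2 [v]

-- adjacency: 'adj = defaultdict(set); for a, b in edges: if a,b in remaining: adj[a].add(b); adj[b].add(a)'
def buildAdj (remaining : PySem.Set Int) (edges : List (Int × Int)) : PySem.Dict Int (PySem.Set Int) :=
  edges.foldl (fun d p =>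
    if PySem.Set.contains remaining p.1 && PySem.Set.contains remaining p.2 then
      (d.modify p.1 [] (fun s => PySem.Set.add s p.2)).modify p.2 [] (fun s => PySem.Set.add s p.1)
    else d) PySem.Dict.empty

-- all vertices mentioned by the adjacency dict (keys and neighbours); used only by the
-- termination measure of the DFS loop below
def pvAdjU (adj : PySem.Dict Int (PySem.Set Int)) : List Int :=
  adj.items.flatMap (fun p => p.1 :: p.2)

lemma pvSublist_flatMap_of_mem {α β : Type} (f : α → List β) {l : List α} {a : α} (h : a ∈ l) :
    (f a).Sublist (l.flatMap f) := by
  induction l with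
  | nil => cases h
  | cons b t ih =>
    rw [List.flatMap_cons]
    rcases List.mem_cons.mp h with rfl | h'
    · exact List.sublist_append_left _ _
    · exact (ih h').trans (List.sublist_append_right _ _)

lemma pvVal_sublist (adj : PySem.Dict Int (PySem.Set Int)) (node : Int) (val : PySem.Set Int)
    (h : adj.get? node = some val) : (node :: val).Sublist (pvAdjU adj) := by
  have hmem : (node, val) ∈ adj.items := PySem.Dict.mem_items_of_get?_eq_some adj h
  simpa using pvSublist_flatMap_of_mem (fun q => q.1 :: q.2) hmem

-- the 'while stack:' DFS loop of get_components; pops from the end, extends with adj[node] - visited.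
-- (Python iterates 'adj[node] - visited' in hash order when extending the stack; only the traversal
-- order depends on that, not the visited/comp SETS returned, so list order is exact here.)
def dfs (adj : PySem.Dict Int (PySem.Set Int)) (visited comp : PySem.Set Int) (stack : List Int) :
    PySem.Set Int × PySem.Set Int :=
  match hs : stack.getLast? with
  | none => (visited, comp)
  | some node =>
    if hv : PySem.Set.contains visited node then
      dfs adj visited comp stack.dropLast
    else
      dfs adj (PySem.Set.add visited node) (PySem.Set.add comp node)
        (stack.dropLast ++ PySem.Set.diff (adj.getD node []) (PySem.Set.add visited node))
termination_by ((pvAdjU adj).toFinset \ visited.toFinset).card * ((pvAdjU adj).length + 2) + stack.length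
decreasing_by
  · have hne : stack ≠ [] := fun h => by simp [h] at hs
    have hpos : 0 < stack.length := by cases stack with
      | nil => exact absurd rfl hne
      | cons a t => simp
    have hdl : stack.dropLast.length = stack.length - 1 := List.length_dropLast
    have hlt : stack.dropLast.length < stack.length := by omega
    exact Nat.add_lt_add_left hlt _
  · have hne : stack ≠ [] := fun h => by simp [h] at hs
    have hpos : 0 < stack.length := by cases stack with
      | nil => exact absurd rfl hne
      | cons a t => simp
    have hvis : node ∉ visited := fun hmem => hv (by simpa using hmem)
    have hadd : PySem.Set.add visited node = visited ++ [node] := PySem.Set.add_of_not_mem hvis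
    have htof : (visited ++ [node]).toFinset = insert node visited.toFinset := by
      ext x; simp
    rw [hadd, htof]
    have hsub : (pvAdjU adj).toFinset \ insert node visited.toFinset
        ⊆ (pvAdjU adj).toFinset \ visited.toFinset :=
      Finset.sdiff_subset_sdiff (Finset.Subset.refl _) (Finset.subset_insert _ _)
    rcases hget : adj.get? node with _ | val
    · have hgd : adj.getD node [] = [] := PySem.Dict.getD_of_get?_eq_none adj [] hget
      have hcard := Finset.card_le_card hsub
      have hmul := Nat.mul_le_mul_right ((pvAdjU adj).length + 2) hcard
      have hdiff : (PySem.Set.diff (adj.getD node []) (visited ++ [node])).length ≤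
          (adj.getD node []).length := List.length_filter_le _ _
      have hlen0 : (adj.getD node []).length = 0 := by rw [hgd]; rfl
      simp only [List.length_append, List.length_dropLast]
      omega
    · have hgd : adj.getD node [] = val := PySem.Dict.getD_of_get?_eq_some adj [] hget
      have hsubl : (node :: val).Sublist (pvAdjU adj) := pvVal_sublist adj node val hget
      have hnode : node ∈ pvAdjU adj := hsubl.subset (by simp)
      have hlenval : val.length + 1 ≤ (pvAdjU adj).length := by
        have := hsubl.length_le; simpa using this
      have hdiff : (PySem.Set.diff (adj.getD node []) (visited ++ [node])).length ≤ val.length := by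
        rw [hgd]; exact List.length_filter_le _ _
      have hnodeSV : node ∈ (pvAdjU adj).toFinset \ visited.toFinset :=
        Finset.mem_sdiff.mpr ⟨List.mem_toFinset.mpr hnode,
          fun hmem => hvis (List.mem_toFinset.mp hmem)⟩
      have hssub : (pvAdjU adj).toFinset \ insert node visited.toFinset
          ⊂ (pvAdjU adj).toFinset \ visited.toFinset :=
        (Finset.ssubset_iff_of_subset hsub).mpr ⟨node, hnodeSV, by simp⟩
      have hcard := Finset.card_lt_card hssub
      have hmul : ((pvAdjU adj).toFinset \ insert node visited.toFinset).card *
            ((pvAdjU adj).length + 2) + ((pvAdjU adj).length + 2)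
          ≤ ((pvAdjU adj).toFinset \ visited.toFinset).card * ((pvAdjU adj).length + 2) := by
        have h1 := Nat.mul_le_mul_right ((pvAdjU adj).length + 2) hcard
        simpa [Nat.add_mul] using h1
      simp only [List.length_append, List.length_dropLast]
      omega

-- get_components: connected components of the subgraph induced by verts, discovered in
-- increasing order of their smallest vertex (the 'for v in sorted(remaining)' loop)
def get_components (verts : PySem.Set Int) (edges : List (Int × Int)) : List (PySem.Set Int) :=
  let remaining := verts
  let adj := buildAdj remaining edges
  ((PySem.List.sorted remaining (fun x => x) false).foldl
    (fun st w =>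
      if PySem.Set.contains st.1 w then st
      else
        let r := dfs adj st.1 PySem.Set.empty [w]
        (r.1, st.2 ++ [r.2]))
    (PySem.Set.empty, [])).2

def is_adjacent (u v : Int) (edges : List (Int × Int)) : Bool :=
  edges.contains (u, v) || edges.contains (v, u)

-- comps_u & comps_v: frozensets compare by content (Set.equal); the intersection is only tested for
-- emptiness and scanned for existence, so its order is not observable.
def shared_components (u v : Int) (vertices : List Int) (edges : List (Int × Int)) :
    List (PySem.Set Int) :=
  let st_u := pyStar u edges vertices
  let st_v := pyStar v edges vertices
  let comps_u := get_components (PySem.Set.diff (PySem.Set.ofList vertices) st_u) edges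
  let comps_v := get_components (PySem.Set.diff (PySem.Set.ofList vertices) st_v) edges
  comps_u.filter (fun C => comps_v.any (fun D => PySem.Set.equal C D))

-- first component of vertices - st(u) containing v ('for c in …: if v in c: return c; return None')
def dominant_component (u v : Int) (vertices : List Int) (edges : List (Int × Int)) :
    Option (PySem.Set Int) :=
  let st_u := pyStar u edges vertices
  let remaining := PySem.Set.diff (PySem.Set.ofList vertices) st_u
  (get_components remaining edges).find? (fun c => PySem.Set.contains c v)

-- A: triple loop over P in tau_u, Q in tau_v with two 'continue' guards, then a scan of shared
-- with an early 'return True' — transliterated as nested List.any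
def do_cross (u : Int) (tau_u : List (List Int)) (v : Int) (tau_v : List (List Int)) (vertices : List Int) (edges : List (Int × Int)) : Bool :=
  if is_adjacent u v edges || u == v then false
  else
    let shared := shared_components u v vertices edges
    if shared.isEmpty then false
    else
      let D_v := dominant_component u v vertices edges
      let D_u := dominant_component v u vertices edges
      tau_u.any (fun P =>
        tau_v.any (fun Q =>
          if (match D_v with | some d => PySem.Set.issubset d P | none => false) then false
          else if (match D_u with | some d => PySem.Set.issubset d Q | none => false) then false
          else shared.any (fun C => PySem.Set.issubset C P && PySem.Set.issubset C Q)))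

-- ===== PORT B =====
-- B's components: no traversal — fold over the edges, fusing the two blocks holding an edge's
-- endpoints.  'next((B for blocks if a in B), None)' is find?; 'blocks.remove(bb)' removes the first
-- ==-equal block, and 'ba is bb' agrees with 'ba == bb' because the blocks stay disjoint and nonempty.
def mergeStep (blocks : List (PySem.Set Int)) (e : Int × Int) : List (PySem.Set Int) :=
  match blocks.find? (fun B => B.contains e.1), blocks.find? (fun B => B.contains e.2) with
  | some ba, some bb =>
      if ba == bb then blocks
      else ((PySem.List.remove? blocks bb).getD blocks).map
            (fun B => if B == ba then PySem.Set.union ba bb else B)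
  | _, _ => blocks

def merge_components (verts : PySem.Set Int) (edges : List (Int × Int)) : List (PySem.Set Int) :=
  edges.foldl mergeStep (verts.map (fun w => [w]))

-- st(u) as B builds it: {u} | {b for (a,b) if a == u} | {a for (a,b) if b == u}
def star_alt (u : Int) (edges : List (Int × Int)) : PySem.Set Int :=
  PySem.Set.union
    (PySem.Set.union (PySem.Set.ofList [u]) ((edges.filter (fun p => p.1 == u)).map (fun p => p.2)))
    ((edges.filter (fun p => p.2 == u)).map (fun p => p.1))

def do_cross_alt (u : Int) (tau_u : List (List Int)) (v : Int) (tau_v : List (List Int)) (vertices : List Int) (edges : List (Int × Int)) : Bool :=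
  if u == v || edges.contains (u, v) || edges.contains (v, u) then false
  else
    let comps_u := merge_components (PySem.Set.diff (PySem.Set.ofList vertices) (star_alt u edges)) edges
    let comps_v := merge_components (PySem.Set.diff (PySem.Set.ofList vertices) (star_alt v edges)) edges
    let shared := comps_u.filter (fun C => comps_v.any (fun D => PySem.Set.equal C D))
    if shared.isEmpty then false
    else
      let D_v := comps_u.find? (fun C => C.contains v)
      let D_u := comps_v.find? (fun C => C.contains u)
      shared.any (fun C =>
        (tau_u.any (fun P => PySem.Set.issubset C P &&
          !(match D_v with | some d => PySem.Set.issubset d P | none => false))) &&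
        (tau_v.any (fun Q => PySem.Set.issubset C Q &&
          !(match D_u with | some d => PySem.Set.issubset d Q | none => false))))

-- ===== PRECONDITION & SPEC =====
def Spec_do_cross (u : Int) (tau_u : List (List Int)) (v : Int) (tau_v : List (List Int)) (vertices : List Int) (edges : List (Int × Int)) (out : Bool) : Prop := out = do_cross_alt u tau_u v tau_v vertices edges
instance (u : Int) (tau_u : List (List Int)) (v : Int) (tau_v : List (List Int)) (vertices : List Int) (edges : List (Int × Int)) (out : Bool) : Decidable (Spec_do_cross u tau_u v tau_v vertices edges out) := by unfold Spec_do_cross; infer_instance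

-- ===== CLAIM (what is proved, stated in full; the proofs are below) =====
def Claim_equal_do_cross : Prop := ∀ (u : Int) (tau_u : List (List Int)) (v : Int) (tau_v : List (List Int)) (vertices : List Int) (edges : List (Int × Int)), Dom_do_cross u tau_u v tau_v vertices edges → Spec_do_cross u tau_u v tau_v vertices edges (do_cross u tau_u v tau_v vertices edges)

-- ===== LEMMAS AND PROOFS =====

/- ## Connectivity: the abstract middle ground.
   Both ports compute, for a vertex set `verts` and the edge list, the partition of `verts` into
   connected components of the induced subgraph.  `pvRel` is one induced edge step, `pvConn` its
   reflexive-transitive closure. -/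
def pvRel (verts : List Int) (edges : List (Int × Int)) (x y : Int) : Prop :=
  x ∈ verts ∧ y ∈ verts ∧ ((x, y) ∈ edges ∨ (y, x) ∈ edges)

def pvConn (verts : List Int) (edges : List (Int × Int)) : Int → Int → Prop :=
  Relation.ReflTransGen (pvRel verts edges)

-- reachability along vertices outside V (what a DFS with pre-visited set V discovers)
def pvAvoid (verts : List Int) (edges : List (Int × Int)) (V : List Int) : Int → Int → Prop :=
  Relation.ReflTransGen (fun a b => pvRel verts edges a b ∧ b ∉ V)

lemma pvRel_symm {verts : List Int} {edges : List (Int × Int)} {x y : Int}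
    (h : pvRel verts edges x y) : pvRel verts edges y x :=
  ⟨h.2.1, h.1, h.2.2.symm⟩

lemma pvConn_symm {verts : List Int} {edges : List (Int × Int)} {x y : Int}
    (h : pvConn verts edges x y) : pvConn verts edges y x :=
  Relation.ReflTransGen.symmetric (fun _ _ hr => pvRel_symm hr) h

lemma pvConn_mem_right {verts : List Int} {edges : List (Int × Int)} {x y : Int}
    (h : pvConn verts edges x y) (hx : x ∈ verts) : y ∈ verts := by
  induction h with
  | refl => exact hx
  | tail _ hstep _ => exact hstep.2.1

-- membership in the adjacency dict A builds = one induced edge step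
lemma buildAdj_getD (verts : List Int) (edges : List (Int × Int)) (a b : Int) :
    b ∈ (buildAdj verts edges).getD a [] ↔ pvRel verts edges a b := by
  induction edges using List.reverseRecOn with
  | nil =>
    simp [buildAdj, pvRel, PySem.Dict.getD_empty]
  | append_singleton es e ih =>
    have hstep : buildAdj verts (es ++ [e]) =
        (if PySem.Set.contains verts e.1 && PySem.Set.contains verts e.2 then
          ((buildAdj verts es).modify e.1 [] (fun s => PySem.Set.add s e.2)).modify e.2 []
            (fun s => PySem.Set.add s e.1)
        else buildAdj verts es) := by
      simp [buildAdj, List.foldl_append]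
    have hmem : b ∈ (buildAdj verts (es ++ [e])).getD a [] ↔
        b ∈ (buildAdj verts es).getD a [] ∨
          ((e.1 ∈ verts ∧ e.2 ∈ verts) ∧ ((a = e.1 ∧ b = e.2) ∨ (a = e.2 ∧ b = e.1))) := by
      rw [hstep]
      by_cases hc : (PySem.Set.contains verts e.1 && PySem.Set.contains verts e.2) = true
      · have h1 : e.1 ∈ verts ∧ e.2 ∈ verts := by
          simp only [Bool.and_eq_true, PySem.Set.contains_iff] at hc; exact hc
        rw [if_pos hc, PySem.Dict.getD_modify]
        by_cases ha2 : a = e.2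
        · rw [if_pos ha2, PySem.Set.mem_add, PySem.Dict.getD_modify]
          by_cases ha1 : e.2 = e.1
          · have hae1 : a = e.1 := ha2.trans ha1
            rw [if_pos ha1, PySem.Set.mem_add]
            constructor
            · rintro ((hb | rfl) | rfl)
              · exact Or.inl (by rw [hae1]; exact hb)
              · exact Or.inr ⟨h1, Or.inl ⟨hae1, rfl⟩⟩
              · exact Or.inr ⟨h1, Or.inr ⟨ha2, rfl⟩⟩
            · rintro (hb | ⟨_, (⟨_, rfl⟩ | ⟨_, rfl⟩)⟩)
              · exact Or.inl (Or.inl (by rw [← hae1]; exact hb))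
              · exact Or.inl (Or.inr rfl)
              · exact Or.inr rfl
          · rw [if_neg ha1, ha2]
            constructor
            · rintro (hb | rfl)
              · exact Or.inl hb
              · exact Or.inr ⟨h1, Or.inr ⟨rfl, rfl⟩⟩
            · rintro (hb | ⟨_, (⟨hae, hbe⟩ | ⟨hae, hbe⟩)⟩)
              · exact Or.inl hb
              · exact absurd hae ha1
              · exact Or.inr hbe
        · rw [if_neg ha2, PySem.Dict.getD_modify]
          by_cases ha1 : a = e.1
          · rw [if_pos ha1, PySem.Set.mem_add, ha1]
            constructor
            · rintro (hb | rfl)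
              · exact Or.inl hb
              · exact Or.inr ⟨h1, Or.inl ⟨rfl, rfl⟩⟩
            · rintro (hb | ⟨_, (⟨hae, hbe⟩ | ⟨hae, hbe⟩)⟩)
              · exact Or.inl hb
              · exact Or.inr hbe
              · exact absurd (ha1.trans hae) ha2
          · rw [if_neg ha1]
            constructor
            · exact fun hb => Or.inl hb
            · rintro (hb | ⟨_, (⟨hae, hbe⟩ | ⟨hae, hbe⟩)⟩)
              · exact hb
              · exact absurd hae ha1
              · exact absurd hae ha2
      · have h1 : ¬ (e.1 ∈ verts ∧ e.2 ∈ verts) := by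
          simp only [Bool.and_eq_true, PySem.Set.contains_iff] at hc; exact fun h => hc ⟨h.1, h.2⟩
        rw [if_neg hc]
        exact ⟨fun hb => Or.inl hb, by rintro (hb | ⟨hm, _⟩); exacts [hb, absurd hm h1]⟩
    rw [hmem, ih]
    unfold pvRel
    constructor
    · rintro (⟨hav, hbv, h⟩ | ⟨⟨h1, h2⟩, (⟨rfl, rfl⟩ | ⟨rfl, rfl⟩)⟩)
      · exact ⟨hav, hbv, h.imp (fun hh => List.mem_append_left _ hh) (fun hh => List.mem_append_left _ hh)⟩
      · exact ⟨h1, h2, Or.inl (List.mem_append_right _ (by simp))⟩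
      · exact ⟨h2, h1, Or.inr (List.mem_append_right _ (by simp))⟩
    · rintro ⟨hav, hbv, (h | h)⟩
      · rcases List.mem_append.mp h with h | h
        · exact Or.inl ⟨hav, hbv, Or.inl h⟩
        · simp only [List.mem_singleton] at h
          refine Or.inr ⟨⟨?_, ?_⟩, Or.inl ⟨?_, ?_⟩⟩ <;> rw [← h] <;> assumption
      · rcases List.mem_append.mp h with h | h
        · exact Or.inl ⟨hav, hbv, Or.inr h⟩
        · simp only [List.mem_singleton] at h
          refine Or.inr ⟨⟨?_, ?_⟩, Or.inr ⟨?_, ?_⟩⟩ <;> rw [← h] <;> assumption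

lemma pvAvoid_mono {verts : List Int} {edges : List (Int × Int)} {V W : List Int}
    (h : ∀ x, x ∈ V → x ∈ W) {x y : Int} (ha : pvAvoid verts edges W x y) :
    pvAvoid verts edges V x y :=
  Relation.ReflTransGen.mono (fun _ _ hb => ⟨hb.1, fun hm => hb.2 (h _ hm)⟩) ha

lemma pvAvoid_to_conn {verts : List Int} {edges : List (Int × Int)} {V : List Int} {x y : Int}
    (ha : pvAvoid verts edges V x y) : pvConn verts edges x y :=
  Relation.ReflTransGen.mono (fun _ _ hb => hb.1) ha

-- splitting an avoiding walk at a freshly visited vertex `node`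
lemma pvAvoid_step {verts : List Int} {edges : List (Int × Int)} {V : List Int} {node x y : Int}
    (ha : pvAvoid verts edges V x y) :
    pvAvoid verts edges (PySem.Set.add V node) x y ∨ y = node ∨
      ∃ z, pvRel verts edges node z ∧ z ∉ PySem.Set.add V node ∧
        pvAvoid verts edges (PySem.Set.add V node) z y := by
  induction ha using Relation.ReflTransGen.head_induction_on with
  | refl => exact Or.inl Relation.ReflTransGen.refl
  | head h' _ ih =>
    rename_i a c _
    rcases ih with ihc | ihc | ihc
    · by_cases hcn : c = node
      · subst hcn
        rcases Relation.ReflTransGen.cases_head ihc with rfl | ⟨z, hz, hrest⟩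
        · exact Or.inr (Or.inl rfl)
        · exact Or.inr (Or.inr ⟨z, hz.1, hz.2, hrest⟩)
      · refine Or.inl (Relation.ReflTransGen.head ⟨h'.1, ?_⟩ ihc)
        rw [PySem.Set.mem_add]; rintro (hm | rfl); exacts [h'.2 hm, hcn rfl]
    · exact Or.inr (Or.inl ihc)
    · exact Or.inr (Or.inr ihc)

def pvClosed (verts : List Int) (edges : List (Int × Int)) (V : List Int) : Prop :=
  ∀ a ∈ V, ∀ b, pvRel verts edges a b → b ∈ V

lemma pvConn_iff_avoid {verts : List Int} {edges : List (Int × Int)} {V : List Int} {x : Int}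
    (hcl : pvClosed verts edges V) (hx : x ∉ V) (y : Int) :
    pvConn verts edges x y ↔ pvAvoid verts edges V x y := by
  constructor
  · intro h
    induction h using Relation.ReflTransGen.head_induction_on with
    | refl => exact Relation.ReflTransGen.refl
    | head h' _ ih =>
      rename_i a c _
      have hcV : c ∉ V := fun hc => hx (hcl c hc a (pvRel_symm h'))
      exact Relation.ReflTransGen.head ⟨h', hcV⟩ (ih hcV)
  · exact pvAvoid_to_conn

-- one-step unfoldings of the DFS loop
lemma dfs_unfold_none (adj : PySem.Dict Int (PySem.Set Int)) (V comp : PySem.Set Int)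
    (stack : List Int) (h : stack.getLast? = none) : dfs adj V comp stack = (V, comp) := by
  rw [dfs]; split
  · rfl
  · rename_i node heq; rw [h] at heq; cases heq

lemma dfs_unfold_mem (adj : PySem.Dict Int (PySem.Set Int)) (V comp : PySem.Set Int)
    (stack : List Int) (node : Int) (h : stack.getLast? = some node)
    (hv : PySem.Set.contains V node = true) :
    dfs adj V comp stack = dfs adj V comp stack.dropLast := by
  rw [dfs]; split
  · rename_i heq; rw [h] at heq; cases heq
  · rename_i node' heq
    rw [h] at heq
    cases heq
    rw [dif_pos hv]

lemma dfs_unfold_new (adj : PySem.Dict Int (PySem.Set Int)) (V comp : PySem.Set Int)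
    (stack : List Int) (node : Int) (h : stack.getLast? = some node)
    (hv : ¬ PySem.Set.contains V node = true) :
    dfs adj V comp stack = dfs adj (PySem.Set.add V node) (PySem.Set.add comp node)
      (stack.dropLast ++ PySem.Set.diff (adj.getD node []) (PySem.Set.add V node)) := by
  rw [dfs]; split
  · rename_i heq; rw [h] at heq; cases heq
  · rename_i node' heq
    rw [h] at heq
    cases heq
    rw [dif_neg hv]

-- replacing the popped vertex by its unvisited neighbours keeps the reachable set
lemma pvStack_transfer (verts : List Int) (edges : List (Int × Int)) (V : PySem.Set Int)
    (node : Int) (dl : List Int) (hnode : node ∉ V) (y : Int) :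
    (∃ x ∈ dl ++ [node], x ∉ V ∧ pvAvoid verts edges V x y) ↔
      (y = node ∨ ∃ x ∈ dl ++ PySem.Set.diff ((buildAdj verts edges).getD node [])
          (PySem.Set.add V node), x ∉ PySem.Set.add V node ∧
          pvAvoid verts edges (PySem.Set.add V node) x y) := by
  constructor
  · rintro ⟨x, hx, hxV, hav⟩
    rcases pvAvoid_step (node := node) hav with h | h | h
    · by_cases hxn : x = node
      · subst hxn
        rcases Relation.ReflTransGen.cases_head h with rfl | ⟨z, hz, hrest⟩
        · exact Or.inl rfl
        · refine Or.inr ⟨z, List.mem_append_right _ ?_, hz.2, hrest⟩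
          rw [PySem.Set.mem_diff, buildAdj_getD]
          exact ⟨hz.1, hz.2⟩
      · have hxdl : x ∈ dl := by
          rcases List.mem_append.mp hx with h' | h'
          · exact h'
          · simp only [List.mem_singleton] at h'; exact absurd h' hxn
        refine Or.inr ⟨x, List.mem_append_left _ hxdl, ?_, h⟩
        rw [PySem.Set.mem_add]; rintro (hm | rfl); exacts [hxV hm, hxn rfl]
    · exact Or.inl h
    · obtain ⟨z, hrel, hzadd, hrest⟩ := h
      refine Or.inr ⟨z, List.mem_append_right _ ?_, hzadd, hrest⟩
      rw [PySem.Set.mem_diff, buildAdj_getD]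
      exact ⟨hrel, hzadd⟩
  · rintro (rfl | ⟨x, hx, hxadd, hav⟩)
    · exact ⟨y, List.mem_append_right _ (by simp), hnode, Relation.ReflTransGen.refl⟩
    · have hxV : x ∉ V := fun hm => hxadd ((PySem.Set.mem_add V node x).mpr (Or.inl hm))
      have hsub : ∀ w, w ∈ V → w ∈ PySem.Set.add V node :=
        fun w hw => (PySem.Set.mem_add V node w).mpr (Or.inl hw)
      rcases List.mem_append.mp hx with hxdl | hxdiff
      · exact ⟨x, List.mem_append_left _ hxdl, hxV, pvAvoid_mono hsub hav⟩
      · rw [PySem.Set.mem_diff, buildAdj_getD] at hxdiff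
        refine ⟨node, List.mem_append_right _ (by simp), hnode, ?_⟩
        exact Relation.ReflTransGen.head ⟨hxdiff.1, hxV⟩ (pvAvoid_mono hsub hav)

-- what the DFS loop computes: visited grows by (and comp collects) exactly the vertices
-- reachable from the stack while avoiding the initial visited set
set_option maxHeartbeats 1000000 in
lemma dfs_mem (verts : List Int) (edges : List (Int × Int))
    (visited comp stack : PySem.Set Int) (y : Int) :
    (y ∈ (dfs (buildAdj verts edges) visited comp stack).1 ↔
      y ∈ visited ∨ ∃ x ∈ stack, x ∉ visited ∧ pvAvoid verts edges visited x y) ∧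
    (y ∈ (dfs (buildAdj verts edges) visited comp stack).2 ↔
      y ∈ comp ∨ ∃ x ∈ stack, x ∉ visited ∧ pvAvoid verts edges visited x y) := by
  induction visited, comp, stack using dfs.induct (adj := buildAdj verts edges) with
  | case1 V comp stack hs =>
    have hnil : stack = [] := List.getLast?_eq_none_iff.mp hs
    subst hnil
    rw [dfs_unfold_none _ _ _ _ hs]
    simp
  | case2 V comp stack node hs hv ih =>
    obtain ⟨dl, rfl⟩ := List.getLast?_eq_some_iff.mp hs
    rw [dfs_unfold_mem (buildAdj verts edges) V comp (dl ++ [node]) node hs hv, List.dropLast_concat]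
    rw [List.dropLast_concat] at ih
    have hmem : node ∈ V := (PySem.Set.contains_iff V node).mp hv
    have hE : (∃ x ∈ dl ++ [node], x ∉ V ∧ pvAvoid verts edges V x y) ↔
        (∃ x ∈ dl, x ∉ V ∧ pvAvoid verts edges V x y) := by
      constructor
      · rintro ⟨x, hx, hxV, hav⟩
        rcases List.mem_append.mp hx with h' | h'
        · exact ⟨x, h', hxV, hav⟩
        · simp only [List.mem_singleton] at h'; subst h'; exact absurd hmem hxV
      · rintro ⟨x, hx, hxV, hav⟩
        exact ⟨x, List.mem_append_left _ hx, hxV, hav⟩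
    rw [hE]
    exact ih
  | case3 V comp stack node hs hv ih =>
    obtain ⟨dl, rfl⟩ := List.getLast?_eq_some_iff.mp hs
    have hnode : node ∉ V := fun hm => hv ((PySem.Set.contains_iff V node).mpr hm)
    rw [dfs_unfold_new (buildAdj verts edges) V comp (dl ++ [node]) node hs hv, List.dropLast_concat]
    rw [List.dropLast_concat] at ih
    have hT := pvStack_transfer verts edges V node dl hnode y
    have hVadd := PySem.Set.mem_add V node y
    have hCadd := PySem.Set.mem_add comp node y
    constructor
    · rw [ih.1, hT, hVadd]; exact or_assoc
    · rw [ih.2, hT, hCadd]; exact or_assoc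

-- "L is the list of connected components of verts": every entry is the class of one of its
-- vertices, and every vertex of verts lies in some entry
def pvIsClassList (verts : List Int) (edges : List (Int × Int)) (L : List (PySem.Set Int)) : Prop :=
  (∀ C ∈ L, ∃ w ∈ verts, ∀ y, y ∈ C ↔ pvConn verts edges w y) ∧
  (∀ w ∈ verts, ∃ C ∈ L, w ∈ C)

def pvInv (verts : List Int) (edges : List (Int × Int))
    (st : PySem.Set Int × List (PySem.Set Int)) : Prop :=
  pvClosed verts edges st.1 ∧
  (∀ C ∈ st.2, ∃ w ∈ verts, ∀ y, y ∈ C ↔ pvConn verts edges w y) ∧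
  (∀ y ∈ st.1, ∃ C ∈ st.2, y ∈ C)

lemma comp_fold (verts : List Int) (edges : List (Int × Int)) (l : List Int)
    (hl : ∀ w ∈ l, w ∈ verts) (st : PySem.Set Int × List (PySem.Set Int))
    (h : pvInv verts edges st) :
    pvInv verts edges (l.foldl
      (fun st w =>
        if PySem.Set.contains st.1 w then st
        else
          let r := dfs (buildAdj verts edges) st.1 PySem.Set.empty [w]
          (r.1, st.2 ++ [r.2])) st) ∧
    (∀ x ∈ st.1, x ∈ (l.foldl (fun st w =>
        if PySem.Set.contains st.1 w then st
        else
          let r := dfs (buildAdj verts edges) st.1 PySem.Set.empty [w]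
          (r.1, st.2 ++ [r.2])) st).1) ∧
    (∀ w ∈ l, w ∈ (l.foldl (fun st w =>
        if PySem.Set.contains st.1 w then st
        else
          let r := dfs (buildAdj verts edges) st.1 PySem.Set.empty [w]
          (r.1, st.2 ++ [r.2])) st).1) := by
  induction l generalizing st with
  | nil => exact ⟨h, fun x hx => hx, fun w hw => absurd hw (List.not_mem_nil)⟩
  | cons w t ih =>
    have hwv : w ∈ verts := hl w (List.mem_cons_self)
    simp only [List.foldl_cons]
    by_cases hw : PySem.Set.contains st.1 w = true
    · rw [if_pos hw]
      have hres := ih (fun x hx => hl x (List.mem_cons_of_mem _ hx)) st h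
      refine ⟨hres.1, hres.2.1, fun x hx => ?_⟩
      rcases List.mem_cons.mp hx with rfl | hx'
      · exact hres.2.1 x ((PySem.Set.contains_iff st.1 x).mp hw)
      · exact hres.2.2 x hx'
    · rw [if_neg hw]
      have hwV : w ∉ st.1 := fun hm => hw ((PySem.Set.contains_iff st.1 w).mpr hm)
      -- the new state after one DFS
      have hd := fun y => dfs_mem verts edges st.1 PySem.Set.empty [w] y
      have hv1 : ∀ y, y ∈ (dfs (buildAdj verts edges) st.1 PySem.Set.empty [w]).1 ↔
          y ∈ st.1 ∨ pvConn verts edges w y := by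
        intro y
        rw [(hd y).1]
        constructor
        · rintro (hm | ⟨x, hx, hxV, hav⟩)
          · exact Or.inl hm
          · simp only [List.mem_singleton] at hx; subst hx
            exact Or.inr (pvAvoid_to_conn hav)
        · rintro (hm | hc)
          · exact Or.inl hm
          · exact Or.inr ⟨w, by simp, hwV, (pvConn_iff_avoid h.1 hwV y).mp hc⟩
      have hv2 : ∀ y, y ∈ (dfs (buildAdj verts edges) st.1 PySem.Set.empty [w]).2 ↔
          pvConn verts edges w y := by
        intro y
        rw [(hd y).2]
        constructor
        · rintro (hm | ⟨x, hx, hxV, hav⟩)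
          · exact absurd hm (List.not_mem_nil)
          · simp only [List.mem_singleton] at hx; subst hx
            exact pvAvoid_to_conn hav
        · intro hc
          exact Or.inr ⟨w, by simp, hwV, (pvConn_iff_avoid h.1 hwV y).mp hc⟩
      set st' := ((dfs (buildAdj verts edges) st.1 PySem.Set.empty [w]).1,
        st.2 ++ [(dfs (buildAdj verts edges) st.1 PySem.Set.empty [w]).2]) with hst'
      have hinv' : pvInv verts edges st' := by
        refine ⟨?_, ?_, ?_⟩
        · intro a ha b hrel
          rw [hv1] at ha ⊢
          rcases ha with ha | ha
          · exact Or.inl (h.1 a ha b hrel)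
          · exact Or.inr (Relation.ReflTransGen.tail ha hrel)
        · intro C hC
          rcases List.mem_append.mp hC with hC | hC
          · exact h.2.1 C hC
          · simp only [List.mem_singleton] at hC; subst hC
            exact ⟨w, hwv, hv2⟩
        · intro y hy
          rw [hv1] at hy
          rcases hy with hy | hy
          · obtain ⟨C, hC, hyC⟩ := h.2.2 y hy
            exact ⟨C, List.mem_append_left _ hC, hyC⟩
          · exact ⟨_, List.mem_append_right _ (by simp), (hv2 y).mpr hy⟩
      have hres := ih (fun x hx => hl x (List.mem_cons_of_mem _ hx)) st' hinv'
      refine ⟨hres.1, ?_, ?_⟩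
      · intro x hx
        exact hres.2.1 x ((hv1 x).mpr (Or.inl hx))
      · intro x hx
        rcases List.mem_cons.mp hx with rfl | hx'
        · exact hres.2.1 x ((hv1 x).mpr (Or.inr Relation.ReflTransGen.refl))
        · exact hres.2.2 x hx'

lemma get_components_classes (verts : List Int) (edges : List (Int × Int)) :
    pvIsClassList verts edges (get_components verts edges) := by
  unfold get_components
  have hl : ∀ w ∈ PySem.List.sorted verts (fun x => x) false, w ∈ verts :=
    fun w hw => (PySem.List.mem_sorted verts (fun x => x) false w).mp hw
  have h0 : pvInv verts edges (PySem.Set.empty, ([] : List (PySem.Set Int))) :=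
    ⟨fun a ha => absurd ha (List.not_mem_nil), fun C hC => absurd hC (List.not_mem_nil),
      fun y hy => absurd hy (List.not_mem_nil)⟩
  have hres := comp_fold verts edges (PySem.List.sorted verts (fun x => x) false) hl _ h0
  refine ⟨hres.1.2.1, fun w hw => ?_⟩
  have hwin : w ∈ (((PySem.List.sorted verts (fun x => x) false)).foldl
      (fun st w =>
        if PySem.Set.contains st.1 w then st
        else
          let r := dfs (buildAdj verts edges) st.1 PySem.Set.empty [w]
          (r.1, st.2 ++ [r.2])) (PySem.Set.empty, [])).1 :=
    hres.2.2 w ((PySem.List.mem_sorted verts (fun x => x) false w).mpr hw)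
  exact hres.1.2.2 w hwin

-- "x and y lie in a common block"
def pvCoB (blocks : List (PySem.Set Int)) (x y : Int) : Prop :=
  ∃ B ∈ blocks, x ∈ B ∧ y ∈ B

-- the invariant of B's merging loop: blocks cover exactly verts, are pvConn-sound, pairwise
-- disjoint, nonempty, and pairwise distinct
def pvJ (verts : List Int) (edges : List (Int × Int)) (blocks : List (PySem.Set Int)) : Prop :=
  (∀ y, (∃ B ∈ blocks, y ∈ B) ↔ y ∈ verts) ∧
  (∀ B ∈ blocks, ∀ x ∈ B, ∀ y ∈ B, pvConn verts edges x y) ∧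
  (∀ B ∈ blocks, ∀ B' ∈ blocks, B ≠ B' → ∀ x ∈ B, x ∉ B') ∧
  (∀ B ∈ blocks, B ≠ []) ∧ blocks.Nodup

lemma mergeStep_inv (verts : List Int) (edges : List (Int × Int))
    (blocks : List (PySem.Set Int)) (e : Int × Int) (he : e ∈ edges)
    (h : pvJ verts edges blocks) :
    pvJ verts edges (mergeStep blocks e) ∧
    (∀ x y, pvCoB blocks x y → pvCoB (mergeStep blocks e) x y) ∧
    (e.1 ∈ verts → e.2 ∈ verts → pvCoB (mergeStep blocks e) e.1 e.2) := by
  obtain ⟨hcov, hsound, hdisj, hne, hnd⟩ := h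
  rcases hfa : blocks.find? (fun B => B.contains e.1) with _ | ba
  · -- e.1 lies in no block: e.1 ∉ verts, nothing changes
    have hstep : mergeStep blocks e = blocks := by
      simp only [mergeStep, hfa]
    rw [hstep]
    refine ⟨⟨hcov, hsound, hdisj, hne, hnd⟩, fun x y hxy => hxy, fun h1 h2 => ?_⟩
    obtain ⟨B, hB, h1B⟩ := (hcov e.1).mpr h1
    have := List.find?_eq_none.mp hfa B hB
    rw [PySem.Set.contains_iff] at this
    exact absurd h1B this
  · rcases hfb : blocks.find? (fun B => B.contains e.2) with _ | bb
    · have hstep : mergeStep blocks e = blocks := by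
        simp only [mergeStep, hfa, hfb]
      rw [hstep]
      refine ⟨⟨hcov, hsound, hdisj, hne, hnd⟩, fun x y hxy => hxy, fun h1 h2 => ?_⟩
      obtain ⟨B, hB, h2B⟩ := (hcov e.2).mpr h2
      have := List.find?_eq_none.mp hfb B hB
      rw [PySem.Set.contains_iff] at this
      exact absurd h2B this
    · have hba : ba ∈ blocks := List.mem_of_find?_eq_some hfa
      have hbb : bb ∈ blocks := List.mem_of_find?_eq_some hfb
      have he1 : e.1 ∈ ba := by
        have := List.find?_some hfa; rwa [PySem.Set.contains_iff] at this
      have he2 : e.2 ∈ bb := by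
        have := List.find?_some hfb; rwa [PySem.Set.contains_iff] at this
      by_cases heq : (ba == bb) = true
      · have hbaeq : ba = bb := by simpa using heq
        have hstep : mergeStep blocks e = blocks := by
          simp only [mergeStep, hfa, hfb, if_pos heq]
        rw [hstep]
        exact ⟨⟨hcov, hsound, hdisj, hne, hnd⟩, fun x y hxy => hxy,
          fun _ _ => ⟨ba, hba, he1, hbaeq ▸ he2⟩⟩
      · have hnebb : ba ≠ bb := fun hh => heq (by simp [hh])
        have hstep : mergeStep blocks e =
            (blocks.erase bb).map
              (fun B => if B == ba then PySem.Set.union ba bb else B) := by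
          simp only [mergeStep, hfa, hfb, if_neg heq,
            PySem.List.remove?_eq_some_erase blocks bb hbb, Option.getD_some]
        have hbaerase : ba ∈ blocks.erase bb := (hnd.mem_erase_iff).mpr ⟨hnebb, hba⟩
        have hmem' : ∀ B', B' ∈ mergeStep blocks e ↔
            (B' = PySem.Set.union ba bb ∨ (B' ∈ blocks ∧ B' ≠ ba ∧ B' ≠ bb)) := by
          intro B'
          rw [hstep, List.mem_map]
          constructor
          · rintro ⟨B, hB, rfl⟩
            have hBbl := (hnd.mem_erase_iff).mp hB
            by_cases hBba : B = ba
            · subst hBba; rw [if_pos (by simp)]; exact Or.inl rfl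
            · rw [if_neg (by simpa using hBba)]; exact Or.inr ⟨hBbl.2, hBba, hBbl.1⟩
          · rintro (rfl | ⟨hB, hBba, hBbb⟩)
            · exact ⟨ba, hbaerase, by simp⟩
            · exact ⟨B', (hnd.mem_erase_iff).mpr ⟨hBbb, hB⟩, by simp [hBba]⟩
        have hucov : ∀ y, y ∈ PySem.Set.union ba bb → y ∈ verts := by
          intro y hy
          rcases (PySem.Set.mem_union ba bb y).mp hy with hy | hy
          · exact (hcov y).mp ⟨ba, hba, hy⟩
          · exact (hcov y).mp ⟨bb, hbb, hy⟩
        have hestep : pvConn verts edges e.1 e.2 :=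
          Relation.ReflTransGen.single
            ⟨(hcov e.1).mp ⟨ba, hba, he1⟩, (hcov e.2).mp ⟨bb, hbb, he2⟩,
              Or.inl (by rwa [Prod.mk.eta])⟩
        have hxe1 : ∀ x ∈ PySem.Set.union ba bb, pvConn verts edges x e.1 := by
          intro x hx
          rcases (PySem.Set.mem_union ba bb x).mp hx with hx | hx
          · exact hsound ba hba x hx e.1 he1
          · exact Relation.ReflTransGen.trans (hsound bb hbb x hx e.2 he2)
              (pvConn_symm hestep)
        refine ⟨⟨?_, ?_, ?_, ?_, ?_⟩, ?_, ?_⟩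
        · -- coverage
          intro y
          constructor
          · rintro ⟨B', hB', hyB'⟩
            rcases (hmem' B').mp hB' with rfl | ⟨hB, _, _⟩
            · exact hucov y hyB'
            · exact (hcov y).mp ⟨B', hB, hyB'⟩
          · intro hy
            obtain ⟨B, hB, hyB⟩ := (hcov y).mpr hy
            by_cases hBba : B = ba
            · exact ⟨_, (hmem' _).mpr (Or.inl rfl), (PySem.Set.mem_union ba bb y).mpr
                (Or.inl (hBba ▸ hyB))⟩
            · by_cases hBbb : B = bb
              · exact ⟨_, (hmem' _).mpr (Or.inl rfl), (PySem.Set.mem_union ba bb y).mpr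
                  (Or.inr (hBbb ▸ hyB))⟩
              · exact ⟨B, (hmem' B).mpr (Or.inr ⟨hB, hBba, hBbb⟩), hyB⟩
        · -- soundness
          intro B' hB' x hx y hy
          rcases (hmem' B').mp hB' with rfl | ⟨hB, _, _⟩
          · exact Relation.ReflTransGen.trans (hxe1 x hx) (pvConn_symm (hxe1 y hy))
          · exact hsound B' hB x hx y hy
        · -- disjointness
          intro B' hB' B'' hB'' hBne x hxB' hxB''
          rcases (hmem' B').mp hB' with rfl | ⟨hB1, hB1a, hB1b⟩
          · rcases (hmem' B'').mp hB'' with rfl | ⟨hB2, hB2a, hB2b⟩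
            · exact hBne rfl
            · rcases (PySem.Set.mem_union ba bb x).mp hxB' with hx | hx
              · exact hdisj ba hba B'' hB2 (fun hh => hB2a hh.symm) x hx hxB''
              · exact hdisj bb hbb B'' hB2 (fun hh => hB2b hh.symm) x hx hxB''
          · rcases (hmem' B'').mp hB'' with rfl | ⟨hB2, hB2a, hB2b⟩
            · rcases (PySem.Set.mem_union ba bb x).mp hxB'' with hx | hx
              · exact hdisj B' hB1 ba hba hB1a x hxB' hx
              · exact hdisj B' hB1 bb hbb hB1b x hxB' hx
            · exact hdisj B' hB1 B'' hB2 hBne x hxB' hxB''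
        · -- nonempty
          intro B' hB'
          rcases (hmem' B').mp hB' with rfl | ⟨hB, _, _⟩
          · exact List.ne_nil_of_mem ((PySem.Set.mem_union ba bb e.1).mpr (Or.inl he1))
          · exact hne B' hB
        · -- nodup
          rw [hstep]
          refine List.Nodup.map_on ?_ (hnd.erase bb)
          intro X hX Y hY hXY
          have hXbl := (hnd.mem_erase_iff).mp hX
          have hYbl := (hnd.mem_erase_iff).mp hY
          by_cases hXba : X = ba
          · by_cases hYba : Y = ba
            · rw [hXba, hYba]
            · rw [hXba, if_pos (by simp), if_neg (by simpa using hYba)] at hXY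
              have hY : e.1 ∈ Y := hXY ▸ ((PySem.Set.mem_union ba bb e.1).mpr (Or.inl he1))
              exact absurd hY (hdisj ba hba Y hYbl.2 (fun hh => hYba hh.symm) e.1 he1)
          · by_cases hYba : Y = ba
            · rw [hYba, if_neg (by simpa using hXba), if_pos (by simp)] at hXY
              have hX : e.1 ∈ X := hXY.symm ▸ ((PySem.Set.mem_union ba bb e.1).mpr (Or.inl he1))
              exact absurd hX (hdisj ba hba X hXbl.2 (fun hh => hXba hh.symm) e.1 he1)
            · rwa [if_neg (by simpa using hXba), if_neg (by simpa using hYba)] at hXY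
        · -- pvCoB preservation
          rintro x y ⟨B, hB, hxB, hyB⟩
          by_cases hBba : B = ba
          · exact ⟨_, (hmem' _).mpr (Or.inl rfl),
              (PySem.Set.mem_union ba bb x).mpr (Or.inl (hBba ▸ hxB)),
              (PySem.Set.mem_union ba bb y).mpr (Or.inl (hBba ▸ hyB))⟩
          · by_cases hBbb : B = bb
            · exact ⟨_, (hmem' _).mpr (Or.inl rfl),
                (PySem.Set.mem_union ba bb x).mpr (Or.inr (hBbb ▸ hxB)),
                (PySem.Set.mem_union ba bb y).mpr (Or.inr (hBbb ▸ hyB))⟩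
            · exact ⟨B, (hmem' B).mpr (Or.inr ⟨hB, hBba, hBbb⟩), hxB, hyB⟩
        · -- the processed edge's endpoints are co-blocked
          intro _ _
          exact ⟨_, (hmem' _).mpr (Or.inl rfl),
            (PySem.Set.mem_union ba bb e.1).mpr (Or.inl he1),
            (PySem.Set.mem_union ba bb e.2).mpr (Or.inr he2)⟩

lemma merge_fold (verts : List Int) (edges : List (Int × Int)) (l : List (Int × Int))
    (hsub : ∀ e ∈ l, e ∈ edges) (blocks : List (PySem.Set Int))
    (h : pvJ verts edges blocks) :
    pvJ verts edges (l.foldl mergeStep blocks) ∧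
    (∀ x y, pvCoB blocks x y → pvCoB (l.foldl mergeStep blocks) x y) ∧
    (∀ e ∈ l, e.1 ∈ verts → e.2 ∈ verts → pvCoB (l.foldl mergeStep blocks) e.1 e.2) := by
  induction l generalizing blocks with
  | nil => exact ⟨h, fun x y hxy => hxy, fun e he => absurd he (List.not_mem_nil)⟩
  | cons e t ih =>
    have hstep := mergeStep_inv verts edges blocks e (hsub e (List.mem_cons_self)) h
    have hres := ih (fun e' he' => hsub e' (List.mem_cons_of_mem _ he')) (mergeStep blocks e)
      hstep.1
    simp only [List.foldl_cons]
    refine ⟨hres.1, fun x y hxy => hres.2.1 x y (hstep.2.1 x y hxy), ?_⟩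
    intro e' he' h1 h2
    rcases List.mem_cons.mp he' with rfl | he't
    · exact hres.2.1 e'.1 e'.2 (hstep.2.2 h1 h2)
    · exact hres.2.2 e' he't h1 h2

lemma merge_components_classes (verts : PySem.Set Int) (edges : List (Int × Int))
    (hv : verts.Nodup) : pvIsClassList verts edges (merge_components verts edges) := by
  have h0 : pvJ verts edges (verts.map (fun w => [w])) := by
    refine ⟨?_, ?_, ?_, ?_, ?_⟩
    · intro y
      constructor
      · rintro ⟨B, hB, hyB⟩
        obtain ⟨w, hw, rfl⟩ := List.mem_map.mp hB
        simp only [List.mem_singleton] at hyB; subst hyB; exact hw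
      · intro hy; exact ⟨[y], List.mem_map.mpr ⟨y, hy, rfl⟩, by simp⟩
    · rintro B hB x hx y hy
      obtain ⟨w, hw, rfl⟩ := List.mem_map.mp hB
      simp only [List.mem_singleton] at hx hy; subst hx; subst hy
      exact Relation.ReflTransGen.refl
    · rintro B hB B' hB' hne x hx hx'
      obtain ⟨w, _, rfl⟩ := List.mem_map.mp hB
      obtain ⟨w', _, rfl⟩ := List.mem_map.mp hB'
      simp only [List.mem_singleton] at hx hx'
      exact hne (by rw [← hx, ← hx'])
    · rintro B hB
      obtain ⟨w, _, rfl⟩ := List.mem_map.mp hB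
      simp
    · exact hv.map (fun a b hab => by simpa using hab)
  have hres := merge_fold verts edges edges (fun e he => he) _ h0
  obtain ⟨⟨hcov, hsound, hdisj, hne, _⟩, _, hEP⟩ := hres
  -- completeness: connectivity implies co-blocked in the final block list
  have hcomplete : ∀ x y, pvConn verts edges x y → x ∈ verts →
      pvCoB (edges.foldl mergeStep (verts.map (fun w => [w]))) x y := by
    intro x y hconn hx
    induction hconn with
    | refl =>
      obtain ⟨B, hB, hxB⟩ := (hcov x).mpr hx
      exact ⟨B, hB, hxB, hxB⟩
    | @tail b c hxb hbc ihb =>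
      obtain ⟨B, hB, hxB, hbB⟩ := ihb
      have hco : pvCoB (edges.foldl mergeStep (verts.map (fun w => [w]))) b c := by
        rcases hbc.2.2 with hm | hm
        · exact hEP (b, c) hm hbc.1 hbc.2.1
        · obtain ⟨B', hB', h2, h1⟩ := hEP (c, b) hm hbc.2.1 hbc.1
          exact ⟨B', hB', h1, h2⟩
      obtain ⟨B', hB', hbB', hcB'⟩ := hco
      have hBB' : B = B' := by
        by_contra hne'
        exact hdisj B hB B' hB' hne' b hbB hbB'
      exact ⟨B, hB, hxB, hBB' ▸ hcB'⟩
  constructor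
  · intro C hC
    have hCne := hne C hC
    obtain ⟨w, hw⟩ := List.exists_mem_of_ne_nil C hCne
    have hwv : w ∈ verts := (hcov w).mp ⟨C, hC, hw⟩
    refine ⟨w, hwv, fun y => ⟨fun hy => hsound C hC w hw y hy, fun hy => ?_⟩⟩
    obtain ⟨B', hB', hwB', hyB'⟩ := hcomplete w y hy hwv
    have : C = B' := by
      by_contra hne'
      exact hdisj C hC B' hB' hne' w hw hwB'
    exact this ▸ hyB'
  · intro w hw
    obtain ⟨B, hB, hwB⟩ := (hcov w).mpr hw
    exact ⟨B, hB, hwB⟩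

-- ## Glue: two component lists of the same (verts, edges) have the same blocks up to membership

lemma class_at (verts : List Int) (edges : List (Int × Int)) (L : List (PySem.Set Int))
    (h : pvIsClassList verts edges L) (C : PySem.Set Int) (hC : C ∈ L) (x : Int) (hx : x ∈ C) :
    ∀ y, y ∈ C ↔ pvConn verts edges x y := by
  obtain ⟨w, _, hclass⟩ := h.1 C hC
  have hwx : pvConn verts edges w x := (hclass x).mp hx
  intro y
  rw [hclass y]
  exact ⟨fun hh => Relation.ReflTransGen.trans (pvConn_symm hwx) hh,
    fun hh => Relation.ReflTransGen.trans hwx hh⟩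

lemma class_sub (verts : List Int) (edges : List (Int × Int)) (L : List (PySem.Set Int))
    (h : pvIsClassList verts edges L) (C : PySem.Set Int) (hC : C ∈ L) (y : Int) (hy : y ∈ C) :
    y ∈ verts := by
  obtain ⟨w, hw, hclass⟩ := h.1 C hC
  exact pvConn_mem_right ((hclass y).mp hy) hw

lemma classes_equiv (verts : List Int) (edges : List (Int × Int))
    (L1 L2 : List (PySem.Set Int)) (h1 : pvIsClassList verts edges L1)
    (h2 : pvIsClassList verts edges L2) :
    ∀ C ∈ L1, ∃ C' ∈ L2, ∀ y, y ∈ C ↔ y ∈ C' := by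
  intro C hC
  obtain ⟨w, hw, hclass⟩ := h1.1 C hC
  obtain ⟨C', hC', hwC'⟩ := h2.2 w hw
  have hwC : w ∈ C := (hclass w).mpr Relation.ReflTransGen.refl
  refine ⟨C', hC', fun y => ?_⟩
  rw [class_at verts edges L1 h1 C hC w hwC y, class_at verts edges L2 h2 C' hC' w hwC' y]

lemma issubset_congr (C C' P : PySem.Set Int) (h : ∀ y, y ∈ C ↔ y ∈ C') :
    PySem.Set.issubset C P = PySem.Set.issubset C' P := by
  rw [Bool.eq_iff_iff, PySem.Set.issubset_iff, PySem.Set.issubset_iff]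
  exact ⟨fun hh x hx => hh x ((h x).mpr hx), fun hh x hx => hh x ((h x).mp hx)⟩

-- the component of v (`find?`): on class lists of the same graph it is none on both sides or
-- content-equal on both sides
lemma findv_equiv (verts : List Int) (edges : List (Int × Int))
    (L1 L2 : List (PySem.Set Int)) (h1 : pvIsClassList verts edges L1)
    (h2 : pvIsClassList verts edges L2) (v : Int) :
    (L1.find? (fun C => PySem.Set.contains C v) = none ∧
      L2.find? (fun C => PySem.Set.contains C v) = none) ∨
    (∃ d1 d2, L1.find? (fun C => PySem.Set.contains C v) = some d1 ∧
      L2.find? (fun C => PySem.Set.contains C v) = some d2 ∧ ∀ y, y ∈ d1 ↔ y ∈ d2) := by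
  by_cases hv : v ∈ verts
  · obtain ⟨C1, hC1, hvC1⟩ := h1.2 v hv
    obtain ⟨C2, hC2, hvC2⟩ := h2.2 v hv
    have hs1 : (L1.find? (fun C => PySem.Set.contains C v)).isSome := by
      rw [List.find?_isSome]
      exact ⟨C1, hC1, (PySem.Set.contains_iff C1 v).mpr hvC1⟩
    have hs2 : (L2.find? (fun C => PySem.Set.contains C v)).isSome := by
      rw [List.find?_isSome]
      exact ⟨C2, hC2, (PySem.Set.contains_iff C2 v).mpr hvC2⟩
    obtain ⟨d1, hd1⟩ := Option.isSome_iff_exists.mp hs1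
    obtain ⟨d2, hd2⟩ := Option.isSome_iff_exists.mp hs2
    have hvd1 : v ∈ d1 := by
      have h := List.find?_some hd1; simpa [PySem.Set.contains_iff] using h
    have hvd2 : v ∈ d2 := by
      have h := List.find?_some hd2; simpa [PySem.Set.contains_iff] using h
    refine Or.inr ⟨d1, d2, hd1, hd2, fun y => ?_⟩
    rw [class_at verts edges L1 h1 d1 (List.mem_of_find?_eq_some hd1) v hvd1 y,
      class_at verts edges L2 h2 d2 (List.mem_of_find?_eq_some hd2) v hvd2 y]
  · refine Or.inl ⟨List.find?_eq_none.mpr ?_, List.find?_eq_none.mpr ?_⟩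
    · intro C hC hcon
      exact hv (class_sub verts edges L1 h1 C hC v ((PySem.Set.contains_iff C v).mp hcon))
    · intro C hC hcon
      exact hv (class_sub verts edges L2 h2 C hC v ((PySem.Set.contains_iff C v).mp hcon))

-- the factorization behind B: a (P, Q)-pair passing both guards and sharing a component C exists
-- iff some C has a good P and, independently, a good Q
lemma cross_any_comm {α β γ : Type} (shared : List γ) (tu : List α) (tv : List β)
    (sub1 : γ → α → Bool) (sub2 : γ → β → Bool) (s1 : α → Bool) (s2 : β → Bool) :
    (tu.any fun P => tv.any fun Q =>
       if s1 P then false else if s2 Q then false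
       else shared.any fun C => sub1 C P && sub2 C Q)
    = shared.any (fun C =>
        (tu.any fun P => sub1 C P && !s1 P) && (tv.any fun Q => sub2 C Q && !s2 Q)) := by
  rw [Bool.eq_iff_iff]
  simp only [List.any_eq_true, Bool.and_eq_true, Bool.not_eq_true']
  constructor
  · rintro ⟨P, hP, Q, hQ, h⟩
    by_cases h1 : s1 P = true
    · simp [h1] at h
    by_cases h2 : s2 Q = true
    · simp [h1, h2] at h
    rw [if_neg h1, if_neg h2] at h
    simp only [List.any_eq_true, Bool.and_eq_true] at h
    obtain ⟨C, hC, c1, c2⟩ := h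
    replace h1 : s1 P = false := by revert h1; cases s1 P <;> simp
    replace h2 : s2 Q = false := by revert h2; cases s2 Q <;> simp
    exact ⟨C, hC, ⟨P, hP, c1, h1⟩, ⟨Q, hQ, c2, h2⟩⟩
  · rintro ⟨C, hC, ⟨P, hP, c1, n1⟩, ⟨Q, hQ, c2, n2⟩⟩
    refine ⟨P, hP, Q, hQ, ?_⟩
    rw [if_neg (by simp [n1]), if_neg (by simp [n2])]
    simp only [List.any_eq_true, Bool.and_eq_true]
    exact ⟨C, hC, c1, c2⟩

-- A's pyStar and B's pyStar have the same members, so both sides remove the same vertex set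
lemma diff_star_eq (w : Int) (edges : List (Int × Int)) (vertices : List Int) :
    PySem.Set.diff (PySem.Set.ofList vertices) (pyStar w edges vertices) =
      PySem.Set.diff (PySem.Set.ofList vertices) (star_alt w edges) := by
  have hmem : ∀ x, x ∈ pyStar w edges vertices ↔ x ∈ star_alt w edges := by
    intro x
    simp only [pyStar, star_alt, PySem.Set.mem_union, PySem.Set.mem_ofList]
    tauto
  unfold PySem.Set.diff
  refine List.filter_congr ?_
  intro x _
  have : (pyStar w edges vertices).contains x = (star_alt w edges).contains x := by
    rw [Bool.eq_iff_iff, PySem.Set.contains_iff, PySem.Set.contains_iff]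
    exact hmem x
  rw [this]

-- the equality of the two ports
lemma do_cross_eq (u : Int) (tau_u : List (List Int)) (v : Int) (tau_v : List (List Int))
    (vertices : List Int) (edges : List (Int × Int)) :
    do_cross u tau_u v tau_v vertices edges = do_cross_alt u tau_u v tau_v vertices edges := by
  have hg : (is_adjacent u v edges || (u == v))
      = ((u == v) || edges.contains (u, v) || edges.contains (v, u)) := by
    simp only [is_adjacent]
    cases edges.contains (u, v) <;> cases edges.contains (v, u) <;> cases (u == v) <;> rfl
  simp only [do_cross, do_cross_alt, shared_components, dominant_component, hg]
  by_cases hguard : ((u == v) || edges.contains (u, v) || edges.contains (v, u)) = true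
  · rw [if_pos hguard, if_pos hguard]
  · rw [if_neg hguard, if_neg hguard]
    -- the four component lists
    set vertsU := PySem.Set.diff (PySem.Set.ofList vertices) (pyStar u edges vertices) with hVU
    set vertsV := PySem.Set.diff (PySem.Set.ofList vertices) (pyStar v edges vertices) with hVV
    have hVUe : PySem.Set.diff (PySem.Set.ofList vertices) (star_alt u edges) = vertsU :=
      (diff_star_eq u edges vertices).symm
    have hVVe : PySem.Set.diff (PySem.Set.ofList vertices) (star_alt v edges) = vertsV :=
      (diff_star_eq v edges vertices).symm
    rw [hVUe, hVVe]
    have hndU : vertsU.Nodup := PySem.Set.nodup_diff _ _ (PySem.Set.nodup_ofList vertices)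
    have hndV : vertsV.Nodup := PySem.Set.nodup_diff _ _ (PySem.Set.nodup_ofList vertices)
    have hAu := get_components_classes vertsU edges
    have hAv := get_components_classes vertsV edges
    have hBu := merge_components_classes vertsU edges hndU
    have hBv := merge_components_classes vertsV edges hndV
    set Au := get_components vertsU edges
    set Av := get_components vertsV edges
    set Bu := merge_components vertsU edges
    set Bv := merge_components vertsV edges
    have hUab := classes_equiv vertsU edges Au Bu hAu hBu
    have hUba := classes_equiv vertsU edges Bu Au hBu hAu
    have hVab := classes_equiv vertsV edges Av Bv hAv hBv
    have hVba := classes_equiv vertsV edges Bv Av hBv hAv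
    set sharedA := Au.filter (fun C => Av.any (fun D => PySem.Set.equal C D)) with hsA
    set sharedB := Bu.filter (fun C => Bv.any (fun D => PySem.Set.equal C D)) with hsB
    -- membership-equivalence of the two shared lists
    have hSab : ∀ C ∈ sharedA, ∃ C' ∈ sharedB, ∀ y, y ∈ C ↔ y ∈ C' := by
      intro C hC
      have hCm := List.mem_filter.mp hC
      obtain ⟨C', hC', hCC'⟩ := hUab C hCm.1
      obtain ⟨D, hD, hCD⟩ := List.any_eq_true.mp hCm.2
      have hCDm : ∀ y, y ∈ C ↔ y ∈ D := (PySem.Set.equal_iff C D).mp hCD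
      obtain ⟨D', hD', hDD'⟩ := hVab D hD
      refine ⟨C', List.mem_filter.mpr ⟨hC', List.any_eq_true.mpr ⟨D', hD', ?_⟩⟩, hCC'⟩
      rw [PySem.Set.equal_iff]
      intro y
      rw [← hCC' y, hCDm y, hDD' y]
    have hSba : ∀ C' ∈ sharedB, ∃ C ∈ sharedA, ∀ y, y ∈ C' ↔ y ∈ C := by
      intro C hC
      have hCm := List.mem_filter.mp hC
      obtain ⟨C', hC', hCC'⟩ := hUba C hCm.1
      obtain ⟨D, hD, hCD⟩ := List.any_eq_true.mp hCm.2
      have hCDm : ∀ y, y ∈ C ↔ y ∈ D := (PySem.Set.equal_iff C D).mp hCD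
      obtain ⟨D', hD', hDD'⟩ := hVba D hD
      refine ⟨C', List.mem_filter.mpr ⟨hC', List.any_eq_true.mpr ⟨D', hD', ?_⟩⟩, hCC'⟩
      rw [PySem.Set.equal_iff]
      intro y
      rw [← hCC' y, hCDm y, hDD' y]
    have hEmpty : sharedA.isEmpty = sharedB.isEmpty := by
      rw [Bool.eq_iff_iff, List.isEmpty_iff, List.isEmpty_iff,
        List.eq_nil_iff_forall_not_mem, List.eq_nil_iff_forall_not_mem]
      constructor
      · intro hA C' hC'
        obtain ⟨C, hC, _⟩ := hSba C' hC'
        exact hA C hC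
      · intro hB C hC
        obtain ⟨C', hC', _⟩ := hSab C hC
        exact hB C' hC'
    rw [hEmpty]
    by_cases hempty : sharedB.isEmpty = true
    · rw [if_pos hempty, if_pos hempty]
    · rw [if_neg hempty, if_neg hempty]
      -- the two dominant-component guards agree pointwise
      have hDv := findv_equiv vertsU edges Au Bu hAu hBu v
      have hDu := findv_equiv vertsV edges Av Bv hAv hBv u
      have hgu : ∀ P, (match Au.find? (fun C => PySem.Set.contains C v) with
          | some d => PySem.Set.issubset d P | none => false)
          = (match Bu.find? (fun C => PySem.Set.contains C v) with
          | some d => PySem.Set.issubset d P | none => false) := by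
        intro P
        rcases hDv with ⟨h1, h2⟩ | ⟨d1, d2, h1, h2, hdd⟩
        · rw [h1, h2]
        · rw [h1, h2]
          exact issubset_congr d1 d2 P hdd
      have hgv : ∀ Q, (match Av.find? (fun C => PySem.Set.contains C u) with
          | some d => PySem.Set.issubset d Q | none => false)
          = (match Bv.find? (fun C => PySem.Set.contains C u) with
          | some d => PySem.Set.issubset d Q | none => false) := by
        intro Q
        rcases hDu with ⟨h1, h2⟩ | ⟨d1, d2, h1, h2, hdd⟩
        · rw [h1, h2]
        · rw [h1, h2]
          exact issubset_congr d1 d2 Q hdd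
      rw [cross_any_comm sharedA tau_u tau_v
        (fun C P => PySem.Set.issubset C P) (fun C Q => PySem.Set.issubset C Q)
        (fun P => (match Au.find? (fun C => PySem.Set.contains C v) with
          | some d => PySem.Set.issubset d P | none => false))
        (fun Q => (match Av.find? (fun C => PySem.Set.contains C u) with
          | some d => PySem.Set.issubset d Q | none => false))]
      -- now both sides are `shared.any` of a membership-invariant predicate
      rw [Bool.eq_iff_iff, List.any_eq_true, List.any_eq_true]
      have hFcongr : ∀ (C C' : PySem.Set Int), (∀ y, y ∈ C ↔ y ∈ C') →
          ((tau_u.any fun P => PySem.Set.issubset C P &&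
              !(match Au.find? (fun C => PySem.Set.contains C v) with
                | some d => PySem.Set.issubset d P | none => false)) &&
           (tau_v.any fun Q => PySem.Set.issubset C Q &&
              !(match Av.find? (fun C => PySem.Set.contains C u) with
                | some d => PySem.Set.issubset d Q | none => false)))
          = ((tau_u.any fun P => PySem.Set.issubset C' P &&
              !(match Bu.find? (fun C => PySem.Set.contains C v) with
                | some d => PySem.Set.issubset d P | none => false)) &&
             (tau_v.any fun Q => PySem.Set.issubset C' Q &&
              !(match Bv.find? (fun C => PySem.Set.contains C u) with
                | some d => PySem.Set.issubset d Q | none => false))) := by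
        intro C C' hCC'
        have h1 : (tau_u.any fun P => PySem.Set.issubset C P &&
            !(match Au.find? (fun C => PySem.Set.contains C v) with
              | some d => PySem.Set.issubset d P | none => false))
            = (tau_u.any fun P => PySem.Set.issubset C' P &&
            !(match Bu.find? (fun C => PySem.Set.contains C v) with
              | some d => PySem.Set.issubset d P | none => false)) := by
          refine PySem.List.any_congr_mem (fun P _ => ?_)
          rw [issubset_congr C C' P hCC', hgu P]
        have h2 : (tau_v.any fun Q => PySem.Set.issubset C Q &&
            !(match Av.find? (fun C => PySem.Set.contains C u) with
              | some d => PySem.Set.issubset d Q | none => false))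
            = (tau_v.any fun Q => PySem.Set.issubset C' Q &&
            !(match Bv.find? (fun C => PySem.Set.contains C u) with
              | some d => PySem.Set.issubset d Q | none => false)) := by
          refine PySem.List.any_congr_mem (fun Q _ => ?_)
          rw [issubset_congr C C' Q hCC', hgv Q]
        rw [h1, h2]
      constructor
      · rintro ⟨C, hC, hFC⟩
        obtain ⟨C', hC', hCC'⟩ := hSab C hC
        exact ⟨C', hC', by rw [← hFcongr C C' hCC']; exact hFC⟩
      · rintro ⟨C', hC', hFC'⟩
        obtain ⟨C, hC, hC'C⟩ := hSba C' hC'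
        exact ⟨C, hC, by rw [hFcongr C C' (fun y => (hC'C y).symm)]; exact hFC'⟩

-- ===== VERDICT (by name: the statement is the Claim_ definition above) =====
theorem do_cross_spec : Claim_equal_do_cross := by
  unfold Claim_equal_do_cross Spec_do_cross
  intro u tau_u v tau_v vertices edges _
  exact do_cross_eq u tau_u v tau_v vertices edges
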